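-- pv_equiv track=rewrite | github.com/mblazejczyk/Studia | Python algorithms/Final exam/zad3.py | wykrSys
-- ===== SOURCE A (Python) =====
-- def wykrSys(liczba):
--     alf = "0123456789ABCDEFGHIJKLMNOPQRSTUVWXYZ"
--     lS = f"{liczba}"
--     najwieksza = 0
--     for i in range(len(lS)):
--         for j in range(len(alf)):
--             if lS[i] == alf[j] and j > najwieksza:
--                 najwieksza = j
--                 break
--
--     liczbaStr = f"{liczba}"[::-1]
--     nowa = 0
--     for i in range(len(liczbaStr)):
--         for j in range(len(alf)):
--             if liczbaStr[i] == alf[j]: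
--                 nowa += j * ((najwieksza + 1) ** i)
--     return f"Najmniejszy system to: {najwieksza + 1} \na jego reprezentacja w dziesietnym to {nowa}"
-- ===== SOURCE B (Python) =====
-- def wykrSys(liczba):
--     alf = "0123456789ABCDEFGHIJKLMNOPQRSTUVWXYZ"
--     pos = list(alf)
--     s = f"{liczba}"
--     najwieksza = 0
--     for c in s:
--         i = pos.index(c) if c in pos else 0
--         if i > najwieksza:
--             najwieksza = i
--     nowa = 0
--     for c in s:
--         i = pos.index(c) if c in pos else 0
--         nowa = nowa * (najwieksza + 1) + i
--     return f"Najmniejszy system to: {najwieksza + 1} \na jego reprezentacja w dziesietnym to {nowa}"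
-- ===== Notes on version B (the rewrite author's own statement) =====
-- stated objective: faster
-- what changed: A's inner 36-way scans over the alphabet are replaced by list index/membership lookups, and A's second pass over the reversed string with a fresh exponentiation (najwieksza+1)**i at every position is replaced by a single Horner pass over the forward string.
import Mathlib
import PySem

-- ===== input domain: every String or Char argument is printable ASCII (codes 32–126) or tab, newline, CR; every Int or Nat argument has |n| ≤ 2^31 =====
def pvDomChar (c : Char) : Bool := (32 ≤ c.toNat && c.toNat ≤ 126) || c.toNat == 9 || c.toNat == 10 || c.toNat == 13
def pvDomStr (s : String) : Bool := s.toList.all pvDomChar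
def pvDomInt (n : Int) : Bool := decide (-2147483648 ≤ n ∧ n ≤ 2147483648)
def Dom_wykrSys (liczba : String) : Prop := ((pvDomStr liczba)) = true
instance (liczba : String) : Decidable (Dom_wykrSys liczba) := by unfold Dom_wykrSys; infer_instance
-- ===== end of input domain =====

-- B replaces A's per-position exponentiation (nowa += j * base**i over the reversed string)
-- by a single Horner pass over the forward string; objective: faster (no repeated big pow).

-- the digit alphabet, shared literal of both programs
def pvAlf : List Char := "0123456789ABCDEFGHIJKLMNOPQRSTUVWXYZ".toList

-- ===== PORT A =====
-- inner loop 1: for j in range(len(alf)): if lS[i]==alf[j] and j>naj: naj=j; break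
def pvInner1 (c : Char) (naj : Nat) : List Int → Nat
  | [] => naj
  | j :: js =>
      if c == PySem.List.pyGetD pvAlf j ' ' && decide ((naj : Int) < j) then j.toNat
      else pvInner1 c naj js

-- inner loop 2: for j in range(len(alf)): if liczbaStr[i]==alf[j]: nowa += j*((naj+1)**i)
def pvInner2 (c : Char) (base i : Nat) : List Int → Nat → Nat
  | [], nowa => nowa
  | j :: js, nowa =>
      pvInner2 c base i js
        (if c == PySem.List.pyGetD pvAlf j ' ' then nowa + j.toNat * base ^ i else nowa)

-- outer loop 2: for i in range(len(liczbaStr)): …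
def pvLoop2 (r : List Char) (base : Nat) : List Int → Nat → Nat
  | [], nowa => nowa
  | i :: is, nowa =>
      pvLoop2 r base is
        (pvInner2 (PySem.List.pyGetD r i ' ') base i.toNat
          (PySem.List.pyRange 0 (PySem.List.len pvAlf) 1) nowa)

def wykrSys (liczba : String) : String :=
  -- lS = f"{liczba}"  (liczba is a string, so this is liczba itself)
  let lS := liczba.toList
  let naj := (PySem.List.pyRange 0 (PySem.List.len lS) 1).foldl
      (fun naj i =>
        pvInner1 (PySem.List.pyGetD lS i ' ') naj
          (PySem.List.pyRange 0 (PySem.List.len pvAlf) 1)) 0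
  -- liczbaStr = f"{liczba}"[::-1]
  let r := ((PySem.Str.slice? liczba none none (-1)).getD "").toList
  let nowa := pvLoop2 r (naj + 1) (PySem.List.pyRange 0 (PySem.List.len r) 1) 0
  "Najmniejszy system to: " ++ PySem.Int.toStr ((naj : Int) + 1) ++
    " \na jego reprezentacja w dziesietnym to " ++ PySem.Int.toStr (nowa : Int)

-- ===== PORT B =====
-- i = pos.index(c) if c in pos else 0
def pvDigit (c : Char) : Nat :=
  if pvAlf.contains c then (PySem.List.index? pvAlf c).getD 0 else 0

def wykrSys_alt (liczba : String) : String :=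
  let s := liczba.toList
  let naj := s.foldl (fun naj c => let i := pvDigit c; if i > naj then i else naj) 0
  let nowa := s.foldl (fun nowa c => nowa * (naj + 1) + pvDigit c) 0
  "Najmniejszy system to: " ++ PySem.Int.toStr ((naj : Int) + 1) ++
    " \na jego reprezentacja w dziesietnym to " ++ PySem.Int.toStr (nowa : Int)

-- ===== PRECONDITION & SPEC =====
def Spec_wykrSys (liczba : String) (out : String) : Prop := out = wykrSys_alt liczba
instance (liczba : String) (out : String) : Decidable (Spec_wykrSys liczba out) := by unfold Spec_wykrSys; infer_instance

-- ===== CLAIM (what is proved, stated in full; the proofs are below) =====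
def Claim_equal_wykrSys : Prop := ∀ (liczba : String), Dom_wykrSys liczba → Spec_wykrSys liczba (wykrSys liczba)

-- ===== LEMMAS AND PROOFS =====

theorem pvAlf_nodup : pvAlf.Nodup := by decide

theorem pvAlf_len : pvAlf.length = 36 := by decide

-- index? of the char sitting at position a
theorem index?_of_getElem {a : Nat} (ha : a < pvAlf.length) :
    PySem.List.index? pvAlf (pvAlf[a]) = some a := by
  have hmem : pvAlf[a] ∈ pvAlf := List.getElem_mem ha
  have hs : (PySem.List.index? pvAlf (pvAlf[a])).isSome = true :=
    (PySem.List.index?_isSome_iff _ _).mpr hmem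
  rcases Option.isSome_iff_exists.mp hs with ⟨k, hk⟩
  rcases PySem.List.getElem_of_index?_eq_some hk with ⟨hklen, hkeq, _⟩
  have : k = a := by
    exact (List.Nodup.getElem_inj_iff pvAlf_nodup (hi := hklen) (hj := ha)).mp hkeq
  rw [hk, this]

-- A's first inner loop, characterised over the tail range [a, 36)
theorem inner1_eq (c : Char) (naj : Nat) :
    ∀ (m a : Nat), a + m = 36 →
      pvInner1 c naj (PySem.List.pyRange (a : Int) 36 1) =
        (match PySem.List.index? pvAlf c with
          | some k => if a ≤ k ∧ naj < k then k else naj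
          | none => naj) := by
  intro m
  induction m with
  | zero =>
      intro a ha
      rw [PySem.List.pyRange_one_eq_nil (by omega)]
      cases hw : PySem.List.index? pvAlf c with
      | none => simp [pvInner1]
      | some k =>
          rcases PySem.List.getElem_of_index?_eq_some hw with ⟨hklen, _, _⟩
          rw [pvAlf_len] at hklen
          simp only [pvInner1]
          rw [if_neg (by omega)]
  | succ m ih =>
      intro a ha
      rw [PySem.List.pyRange_one_cons (by omega)]
      have hget : PySem.List.pyGetD pvAlf (a : Int) ' ' = pvAlf[a]'(by rw [pvAlf_len]; omega) := by
        rw [PySem.List.pyGetD_eq_getElem pvAlf ' ' (by omega) (by rw [pvAlf_len]; push_cast; omega)]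
        simp
      by_cases hc : c = pvAlf[a]'(by rw [pvAlf_len]; omega)
      · have hw : PySem.List.index? pvAlf c = some a := by
          rw [hc]; exact index?_of_getElem (by rw [pvAlf_len]; omega)
        simp only [pvInner1, hget, hw]
        by_cases hn : naj < a
        · rw [if_pos (by simp [← hc, hn])]
          simp [Int.toNat_natCast, hn]
        · rw [if_neg (by simp [hn])]
          have : ((a : Int) + 1) = ((a + 1 : Nat) : Int) := by push_cast; ring
          rw [this, ih (a + 1) (by omega)]
          simp only [hw]
          rw [if_neg (by omega), if_neg (by omega)]
      · simp only [pvInner1, hget]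
        rw [if_neg (by simp [hc])]
        have : ((a : Int) + 1) = ((a + 1 : Nat) : Int) := by push_cast; ring
        rw [this, ih (a + 1) (by omega)]
        cases hw : PySem.List.index? pvAlf c with
        | none => rfl
        | some k =>
            rcases PySem.List.getElem_of_index?_eq_some hw with ⟨hklen, hkeq, _⟩
            have hka : k ≠ a := by
              intro h; subst h; exact hc hkeq.symm
            simp only []
            by_cases h1 : a + 1 ≤ k ∧ naj < k
            · rw [if_pos h1, if_pos (by omega)]
            · rw [if_neg h1, if_neg (by omega)]

-- corollary at a = 0: the inner scan is B's max-step
theorem inner1_step (c : Char) (naj : Nat) :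
    pvInner1 c naj (PySem.List.pyRange 0 36 1) =
      (let i := pvDigit c; if i > naj then i else naj) := by
  have h0 : (0 : Int) = ((0 : Nat) : Int) := rfl
  rw [h0, inner1_eq c naj 36 0 rfl]
  cases hw : PySem.List.index? pvAlf c with
  | none =>
      have hnm : c ∉ pvAlf := (PySem.List.index?_eq_none_iff _ _).mp hw
      simp [pvDigit, hnm]
  | some k =>
      have hmem : c ∈ pvAlf := by
        have : (PySem.List.index? pvAlf c).isSome = true := by rw [hw]; rfl
        exact (PySem.List.index?_isSome_iff _ _).mp this
      simp only [pvDigit, List.contains_eq_mem, hmem, decide_true, if_true, hw, Option.getD_some]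
      by_cases h : naj < k
      · rw [if_pos (by omega), if_pos (by omega)]
      · rw [if_neg (by omega), if_neg (by omega)]

-- A's second inner loop, characterised over the tail range [a, 36)
theorem inner2_eq (c : Char) (base i : Nat) :
    ∀ (m a : Nat) (nowa : Nat), a + m = 36 →
      pvInner2 c base i (PySem.List.pyRange (a : Int) 36 1) nowa =
        nowa + (match PySem.List.index? pvAlf c with
          | some k => if a ≤ k then k * base ^ i else 0
          | none => 0) := by
  intro m
  induction m with
  | zero =>
      intro a nowa ha
      rw [PySem.List.pyRange_one_eq_nil (by omega)]
      cases hw : PySem.List.index? pvAlf c with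
      | none => simp [pvInner2]
      | some k =>
          rcases PySem.List.getElem_of_index?_eq_some hw with ⟨hklen, _, _⟩
          rw [pvAlf_len] at hklen
          simp only [pvInner2]
          rw [if_neg (by omega)]
          omega
  | succ m ih =>
      intro a nowa ha
      rw [PySem.List.pyRange_one_cons (by omega)]
      have hget : PySem.List.pyGetD pvAlf (a : Int) ' ' = pvAlf[a]'(by rw [pvAlf_len]; omega) := by
        rw [PySem.List.pyGetD_eq_getElem pvAlf ' ' (by omega) (by rw [pvAlf_len]; push_cast; omega)]
        simp
      have hcast : ((a : Int) + 1) = ((a + 1 : Nat) : Int) := by push_cast; ring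
      by_cases hc : c = pvAlf[a]'(by rw [pvAlf_len]; omega)
      · have hw : PySem.List.index? pvAlf c = some a := by
          rw [hc]; exact index?_of_getElem (by rw [pvAlf_len]; omega)
        simp only [pvInner2, hget]
        rw [if_pos (by simp [← hc])]
        rw [hcast, ih (a + 1) _ (by omega)]
        simp only [hw, Int.toNat_natCast]
        rw [if_neg (by omega), if_pos (by omega)]
        omega
      · simp only [pvInner2, hget]
        rw [if_neg (by simp [hc])]
        rw [hcast, ih (a + 1) _ (by omega)]
        cases hw : PySem.List.index? pvAlf c with
        | none => rfl
        | some k =>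
            rcases PySem.List.getElem_of_index?_eq_some hw with ⟨hklen, hkeq, _⟩
            have hka : k ≠ a := by intro h; subst h; exact hc hkeq.symm
            simp only []
            by_cases h1 : a + 1 ≤ k
            · rw [if_pos h1, if_pos (by omega)]
            · rw [if_neg h1, if_neg (by omega)]

-- corollary at a = 0: the inner scan adds pvDigit c * base^i
theorem inner2_step (c : Char) (base i nowa : Nat) :
    pvInner2 c base i (PySem.List.pyRange 0 36 1) nowa = nowa + pvDigit c * base ^ i := by
  have h0 : (0 : Int) = ((0 : Nat) : Int) := rfl
  rw [h0, inner2_eq c base i 36 0 nowa rfl]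
  cases hw : PySem.List.index? pvAlf c with
  | none =>
      have hnm : c ∉ pvAlf := (PySem.List.index?_eq_none_iff _ _).mp hw
      simp [pvDigit, hnm]
  | some k =>
      have hmem : c ∈ pvAlf := by
        have : (PySem.List.index? pvAlf c).isSome = true := by rw [hw]; rfl
        exact (PySem.List.index?_isSome_iff _ _).mp this
      have hw' : List.idxOf? c pvAlf = some k := by
        rw [← PySem.List.index?_eq_idxOf?]; exact hw
      simp [pvDigit, hmem, hw']

-- the value of a digit string read lowest-position-first
def pvValRev (base : Nat) : List Char → Nat
  | [] => 0
  | c :: t => pvDigit c + base * pvValRev base t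

theorem valRev_append (base : Nat) (xs : List Char) (c : Char) :
    pvValRev base (xs ++ [c]) = pvValRev base xs + pvDigit c * base ^ xs.length := by
  induction xs with
  | nil => simp [pvValRev]
  | cons x t ih => simp [pvValRev, ih]; ring

-- A's outer loop 2 computes pvValRev of the (reversed) string
theorem loop2_eq (r : List Char) (base : Nat) :
    ∀ (m a : Nat) (nowa : Nat), a + m = r.length →
      pvLoop2 r base (PySem.List.pyRange (a : Int) (r.length : Int) 1) nowa =
        nowa + base ^ a * pvValRev base (r.drop a) := by
  intro m
  induction m with
  | zero =>
      intro a nowa ha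
      rw [PySem.List.pyRange_one_eq_nil (by omega)]
      simp [pvLoop2, List.drop_of_length_le (by omega : r.length ≤ a), pvValRev]
  | succ m ih =>
      intro a nowa ha
      rw [PySem.List.pyRange_one_cons (by omega)]
      have halen : a < r.length := by omega
      have hget : PySem.List.pyGetD r (a : Int) ' ' = r[a] := by
        rw [PySem.List.pyGetD_eq_getElem r ' ' (by omega) (by omega)]
        simp
      have hrange : PySem.List.pyRange 0 (PySem.List.len pvAlf) 1 = PySem.List.pyRange 0 36 1 := by
        norm_num [PySem.List.len_eq, pvAlf_len]
      simp only [pvLoop2, hget, hrange, Int.toNat_natCast]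
      rw [inner2_step]
      have hcast : ((a : Int) + 1) = ((a + 1 : Nat) : Int) := by push_cast; ring
      rw [hcast, ih (a + 1) _ (by omega)]
      rw [List.drop_eq_getElem_cons halen]
      simp [pvValRev]
      ring

-- B's Horner fold against pvValRev of the reversed string
theorem horner_eq (base : Nat) :
    ∀ (s : List Char) (nowa : Nat),
      s.foldl (fun nowa c => nowa * base + pvDigit c) nowa =
        nowa * base ^ s.length + pvValRev base s.reverse := by
  intro s
  induction s with
  | nil => intro nowa; simp [pvValRev]
  | cons c t ih =>
      intro nowa
      simp only [List.foldl_cons, List.length_cons, List.reverse_cons]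
      rw [ih, valRev_append]
      simp [List.length_reverse]
      ring

-- ===== VERDICT (by name: the statement is the Claim_ definition above) =====
theorem wykrSys_spec : Claim_equal_wykrSys := by
  intro liczba _
  unfold Spec_wykrSys wykrSys wykrSys_alt
  simp only []
  -- first pass: A's indexed outer loop is B's foldl over the characters
  have hrange36 : PySem.List.pyRange 0 (PySem.List.len pvAlf) 1 = PySem.List.pyRange 0 36 1 := by
    norm_num [PySem.List.len_eq, pvAlf_len]
  have h1 : (PySem.List.pyRange 0 (PySem.List.len liczba.toList) 1).foldl
      (fun naj i => pvInner1 (PySem.List.pyGetD liczba.toList i ' ') naj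
        (PySem.List.pyRange 0 (PySem.List.len pvAlf) 1)) 0 =
      liczba.toList.foldl (fun naj c => let i := pvDigit c; if i > naj then i else naj) 0 := by
    rw [show (fun (naj : Nat) (i : Int) => pvInner1 (PySem.List.pyGetD liczba.toList i ' ') naj
        (PySem.List.pyRange 0 (PySem.List.len pvAlf) 1)) =
        (fun (naj : Nat) (i : Int) => (fun (n : Nat) (c : Char) => pvInner1 c n
        (PySem.List.pyRange 0 (PySem.List.len pvAlf) 1)) naj (PySem.List.pyGetD liczba.toList i ' '))
        from rfl]
    rw [PySem.List.foldl_pyRange_zero_pyGetD liczba.toList ' '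
      (fun (n : Nat) (c : Char) => pvInner1 c n (PySem.List.pyRange 0 (PySem.List.len pvAlf) 1)) 0]
    exact PySem.List.foldl_congr_mem _ _ _ _ (fun acc x _ => by
      rw [hrange36, inner1_step])
  rw [h1]
  -- second pass: A's reversed power loop and B's Horner fold both compute pvValRev
  set naj := liczba.toList.foldl (fun naj c => let i := pvDigit c; if i > naj then i else naj) 0
  have hrev : ((PySem.Str.slice? liczba none none (-1)).getD "").toList = liczba.toList.reverse := by
    rw [PySem.Str.slice?_none_none_neg_one]
    simp
  rw [hrev]
  have h2 : pvLoop2 liczba.toList.reverse (naj + 1)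
      (PySem.List.pyRange 0 (PySem.List.len liczba.toList.reverse) 1) 0 =
      pvValRev (naj + 1) liczba.toList.reverse := by
    have := loop2_eq liczba.toList.reverse (naj + 1) liczba.toList.reverse.length 0 0 (by omega)
    simpa [PySem.List.len_eq] using this
  rw [h2, horner_eq (naj + 1) liczba.toList 0]
  simp
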